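-- pv_equiv track=rewrite | github.com/onera/Maia | maia/transform/duplicate.py | _find_cartesian_vector_names_from_names
-- ===== SOURCE A (Python) =====
-- def _find_cartesian_vector_names_from_names(names):
--   """
--   Function to find basename of cartesian vectors
--   In the SIDS (https://cgns.github.io/CGNS_docs_current/sids/dataname.html), a cartesian
--   vector 'Vector' is describe by its 3 components 'VectorX', 'VectorY', 'VectorZ'
--   > names : list of potential vectors components
--   """
--
--   suffix_names_x = []
--   suffix_names_y = []
--   suffix_names_z = []
--   for name in names:
--     if name[-1] == "X":
--       suffix_names_x.append(name[0:-1])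
--     elif name[-1] == "Y":
--       suffix_names_y.append(name[0:-1])
--     elif name[-1] == "Z":
--       suffix_names_z.append(name[0:-1])
--
--   return sorted(set(suffix_names_x)&set(suffix_names_y)&set(suffix_names_z))
-- ===== SOURCE B (Python) =====
-- def _find_cartesian_vector_names_from_names(names):
--   suffixes = {}
--   for name in names:
--     last = name[-1]
--     if last in "XYZ":
--       base = name[:-1]
--       suffixes[base] = suffixes.get(base, set()) | {last}
--   return sorted(b for b, s in suffixes.items() if len(s) == 3)
-- ===== Notes on version B (the rewrite author's own statement) =====
-- stated objective: idiomatic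
-- what changed: One pass over names building a single dict mapping each basename to the set of its X/Y/Z suffixes, then collecting basenames whose set has all three, instead of three parallel suffix lists combined by a triple set intersection.
import Mathlib
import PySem

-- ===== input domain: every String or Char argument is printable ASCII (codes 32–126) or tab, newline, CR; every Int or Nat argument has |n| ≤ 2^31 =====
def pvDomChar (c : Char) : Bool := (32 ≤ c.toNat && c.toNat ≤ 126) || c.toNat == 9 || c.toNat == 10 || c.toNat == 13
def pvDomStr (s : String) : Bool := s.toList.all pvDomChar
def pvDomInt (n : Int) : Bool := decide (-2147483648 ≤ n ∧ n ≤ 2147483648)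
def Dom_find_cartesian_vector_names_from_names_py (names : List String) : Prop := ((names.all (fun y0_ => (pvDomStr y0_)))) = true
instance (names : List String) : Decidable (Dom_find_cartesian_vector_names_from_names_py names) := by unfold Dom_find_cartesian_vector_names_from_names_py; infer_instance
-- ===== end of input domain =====

-- B builds one dict from basename to its set of X/Y/Z suffixes in a single pass instead of
-- three parallel suffix lists intersected as sets (idiomatic restructuring, same cost).

-- ===== PORT A =====
-- loop body of A: name[-1] dispatches the basename name[0:-1] into one of three lists
def pvStepA (st : List String × List String × List String) (name : String) :
    List String × List String × List String :=
  match PySem.Str.pyGet? name (-1) with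
  | none => st  -- name[-1] raises IndexError on ""; such inputs are excluded by Pre_
  | some c =>
    if c = 'X' then (st.1 ++ [PySem.Str.slice name (some 0) (some (-1))], st.2.1, st.2.2)
    else if c = 'Y' then (st.1, st.2.1 ++ [PySem.Str.slice name (some 0) (some (-1))], st.2.2)
    else if c = 'Z' then (st.1, st.2.1, st.2.2 ++ [PySem.Str.slice name (some 0) (some (-1))])
    else st

def find_cartesian_vector_names_from_names_py (names : List String) : List String :=
  let st := names.foldl pvStepA ([], [], [])
  PySem.List.sorted
    (PySem.Set.inter (PySem.Set.inter (PySem.Set.ofList st.1) (PySem.Set.ofList st.2.1))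
      (PySem.Set.ofList st.2.2)) (fun x => x) false

-- ===== PORT B =====
-- loop body of B: when name[-1] is in "XYZ", add it to the suffix set of name[:-1]
def pvStepB (d : PySem.Dict String (PySem.Set Char)) (name : String) :
    PySem.Dict String (PySem.Set Char) :=
  match PySem.Str.pyGet? name (-1) with
  | none => d  -- name[-1] raises IndexError on ""; such inputs are excluded by Pre_
  | some last =>
    if "XYZ".toList.contains last then      -- last in "XYZ"
      let base := PySem.Str.slice name none (some (-1))
      d.insert base (PySem.Set.union (d.getD base PySem.Set.empty) [last])
    else d

def find_cartesian_vector_names_from_names_py_alt (names : List String) : List String :=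
  let suffixes := names.foldl pvStepB PySem.Dict.empty
  PySem.List.sorted
    ((suffixes.items.filter (fun p => PySem.Set.len p.2 == 3)).map (fun p => p.1))
    (fun x => x) false

-- ===== PRECONDITION & SPEC =====
-- Pre_ excludes only the inputs on which Python A raises: an empty string makes name[-1]
-- an IndexError (B raises there too).
def Pre_find_cartesian_vector_names_from_names_py (names : List String) : Prop :=
  ∀ s ∈ names, s ≠ ""
instance (names : List String) : Decidable (Pre_find_cartesian_vector_names_from_names_py names) := by unfold Pre_find_cartesian_vector_names_from_names_py; infer_instance
def pvWitness_find_cartesian_vector_names_from_names_py : List String := ["aX", "aY", "aZ", "bX"]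
def Spec_find_cartesian_vector_names_from_names_py (names : List String) (out : List String) : Prop := out = find_cartesian_vector_names_from_names_py_alt names
instance (names : List String) (out : List String) : Decidable (Spec_find_cartesian_vector_names_from_names_py names out) := by unfold Spec_find_cartesian_vector_names_from_names_py; infer_instance

-- ===== CLAIM (what is proved, stated in full; the proofs are below) =====
def Claim_equal_find_cartesian_vector_names_from_names_py : Prop := ∀ (names : List String), Dom_find_cartesian_vector_names_from_names_py names → Pre_find_cartesian_vector_names_from_names_py names → Spec_find_cartesian_vector_names_from_names_py names (find_cartesian_vector_names_from_names_py names)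

-- ===== LEMMAS AND PROOFS =====

-- name[0:-1] and name[:-1] are the same slice
theorem pvSlice_eq (s : String) :
    PySem.Str.slice s (some 0) (some (-1)) = PySem.Str.slice s none (some (-1)) := by
  simp only [PySem.Str.slice, PySem.Chars.slice, PySem.List.slice_zero_start]

theorem pvMemXYZ (c : Char) :
    "XYZ".toList.contains c = true ↔ (c = 'X' ∨ c = 'Y' ∨ c = 'Z') := by
  rw [show "XYZ".toList = ['X', 'Y', 'Z'] from rfl, List.contains_iff_mem]
  simp

-- the invariant tying A's three lists to B's dict of suffix sets
def pvInv (x y z : List String) (d : PySem.Dict String (PySem.Set Char)) : Prop :=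
  d.keys.Nodup ∧ ∀ b : String,
    (d.getD b PySem.Set.empty).Nodup ∧
    (∀ c ∈ d.getD b PySem.Set.empty, c = 'X' ∨ c = 'Y' ∨ c = 'Z') ∧
    ('X' ∈ d.getD b PySem.Set.empty ↔ b ∈ x) ∧
    ('Y' ∈ d.getD b PySem.Set.empty ↔ b ∈ y) ∧
    ('Z' ∈ d.getD b PySem.Set.empty ↔ b ∈ z)

theorem pvInv_init : pvInv [] [] [] PySem.Dict.empty := by
  refine ⟨PySem.Dict.nodup_keys_empty, fun b => ?_⟩
  simp [PySem.Dict.getD_empty, PySem.Set.empty]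

theorem pvStep_inv (x y z : List String) (d : PySem.Dict String (PySem.Set Char))
    (name : String) (h : pvInv x y z d) :
    pvInv (pvStepA (x, y, z) name).1 (pvStepA (x, y, z) name).2.1 (pvStepA (x, y, z) name).2.2
      (pvStepB d name) := by
  obtain ⟨hnd, hb⟩ := h
  unfold pvStepA pvStepB
  cases hg : PySem.Str.pyGet? name (-1) with
  | none => exact ⟨hnd, hb⟩
  | some c =>
    dsimp only
    by_cases hX : c = 'X'
    · subst hX
      rw [if_pos (show ("XYZ".toList.contains 'X') = true by decide), if_pos rfl]
      refine ⟨PySem.Dict.nodup_keys_insert _ _ _ hnd, fun b => ?_⟩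
      obtain ⟨h1, h2, h3, h4, h5⟩ := hb b
      rw [pvSlice_eq]
      rw [PySem.Dict.getD_insert]
      by_cases hbase : b = PySem.Str.slice name none (some (-1))
      · obtain ⟨g1, g2, g3, g4, g5⟩ := hb (PySem.Str.slice name none (some (-1)))
        subst hbase
        rw [if_pos rfl]
        refine ⟨PySem.Set.nodup_union _ _ g1, ?_, ?_, ?_, ?_⟩
        · intro ch hch
          rcases (PySem.Set.mem_union _ _ ch).1 hch with hl | hr
          · exact g2 ch hl
          · left; simpa using hr
        · simp [PySem.Set.mem_union]
        · simp only [PySem.Set.mem_union]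
          constructor
          · rintro (hy | hy)
            · exact g4.1 hy
            · simp at hy
          · exact fun hy => Or.inl (g4.2 hy)
        · simp only [PySem.Set.mem_union]
          constructor
          · rintro (hz | hz)
            · exact g5.1 hz
            · simp at hz
          · exact fun hz => Or.inl (g5.2 hz)
      · rw [if_neg hbase]
        refine ⟨h1, h2, ?_, h4, h5⟩
        rw [h3]
        simp only [List.mem_append, List.mem_singleton]
        exact ⟨Or.inl, fun hm => hm.elim id (fun he => absurd he hbase)⟩
    · by_cases hY : c = 'Y'
      · subst hY
        rw [if_pos (show ("XYZ".toList.contains 'Y') = true by decide), if_neg (by decide), if_pos rfl]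
        refine ⟨PySem.Dict.nodup_keys_insert _ _ _ hnd, fun b => ?_⟩
        obtain ⟨h1, h2, h3, h4, h5⟩ := hb b
        rw [pvSlice_eq]
        rw [PySem.Dict.getD_insert]
        by_cases hbase : b = PySem.Str.slice name none (some (-1))
        · obtain ⟨g1, g2, g3, g4, g5⟩ := hb (PySem.Str.slice name none (some (-1)))
          subst hbase
          rw [if_pos rfl]
          refine ⟨PySem.Set.nodup_union _ _ g1, ?_, ?_, ?_, ?_⟩
          · intro ch hch
            rcases (PySem.Set.mem_union _ _ ch).1 hch with hl | hr
            · exact g2 ch hl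
            · right; left; simpa using hr
          · simp only [PySem.Set.mem_union]
            constructor
            · rintro (hx | hx)
              · exact g3.1 hx
              · simp at hx
            · exact fun hx => Or.inl (g3.2 hx)
          · simp only [PySem.Set.mem_union, List.mem_append]
            constructor
            · rintro (hy | hy)
              · exact Or.inl (g4.1 hy)
              · simp
            · rintro (hy | hy)
              · exact Or.inl (g4.2 hy)
              · simp
          · simp only [PySem.Set.mem_union]
            constructor
            · rintro (hz | hz)
              · exact g5.1 hz
              · simp at hz
            · exact fun hz => Or.inl (g5.2 hz)
        · rw [if_neg hbase]
          refine ⟨h1, h2, h3, ?_, h5⟩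
          rw [h4]
          simp only [List.mem_append, List.mem_singleton]
          exact ⟨Or.inl, fun hm => hm.elim id (fun he => absurd he hbase)⟩
      · by_cases hZ : c = 'Z'
        · subst hZ
          rw [if_pos (show ("XYZ".toList.contains 'Z') = true by decide), if_neg (by decide), if_neg (by decide), if_pos rfl]
          refine ⟨PySem.Dict.nodup_keys_insert _ _ _ hnd, fun b => ?_⟩
          obtain ⟨h1, h2, h3, h4, h5⟩ := hb b
          rw [pvSlice_eq]
          rw [PySem.Dict.getD_insert]
          by_cases hbase : b = PySem.Str.slice name none (some (-1))
          · obtain ⟨g1, g2, g3, g4, g5⟩ := hb (PySem.Str.slice name none (some (-1)))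
            subst hbase
            rw [if_pos rfl]
            refine ⟨PySem.Set.nodup_union _ _ g1, ?_, ?_, ?_, ?_⟩
            · intro ch hch
              rcases (PySem.Set.mem_union _ _ ch).1 hch with hl | hr
              · exact g2 ch hl
              · right; right; simpa using hr
            · simp only [PySem.Set.mem_union]
              constructor
              · rintro (hx | hx)
                · exact g3.1 hx
                · simp at hx
              · exact fun hx => Or.inl (g3.2 hx)
            · simp only [PySem.Set.mem_union]
              constructor
              · rintro (hy | hy)
                · exact g4.1 hy
                · simp at hy
              · exact fun hy => Or.inl (g4.2 hy)
            · simp [PySem.Set.mem_union]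
          · rw [if_neg hbase]
            refine ⟨h1, h2, h3, h4, ?_⟩
            rw [h5]
            simp only [List.mem_append, List.mem_singleton]
            exact ⟨Or.inl, fun hm => hm.elim id (fun he => absurd he hbase)⟩
        · have hxyz : ¬ ("XYZ".toList.contains c = true) := by
            rw [pvMemXYZ]; tauto
          rw [if_neg hX, if_neg hY, if_neg hZ, if_neg hxyz]
          exact ⟨hnd, hb⟩

theorem pvFold_inv (names : List String) :
    ∀ (st : List String × List String × List String) (d : PySem.Dict String (PySem.Set Char)),
      pvInv st.1 st.2.1 st.2.2 d →
      pvInv (names.foldl pvStepA st).1 (names.foldl pvStepA st).2.1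
        (names.foldl pvStepA st).2.2 (names.foldl pvStepB d) := by
  induction names with
  | nil => intro st d h; exact h
  | cons n ns ih =>
    intro st d h
    simp only [List.foldl_cons]
    exact ih _ _ (pvStep_inv st.1 st.2.1 st.2.2 d n h)

-- a nodup list of characters drawn from {X,Y,Z} has length 3 iff it holds all three
theorem pvLen3 (v : List Char) (hn : v.Nodup)
    (hs : ∀ c ∈ v, c = 'X' ∨ c = 'Y' ∨ c = 'Z') :
    v.length = 3 ↔ ('X' ∈ v ∧ 'Y' ∈ v ∧ 'Z' ∈ v) := by
  constructor
  · intro hlen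
    refine ⟨?_, ?_, ?_⟩
    · by_contra hX
      have hsub : v ⊆ ['Y', 'Z'] := by
        intro c hc
        rcases hs c hc with h | h | h
        · exact absurd (h ▸ hc) hX
        · simp [h]
        · simp [h]
      have := (hn.subperm hsub).length_le
      simp at this; omega
    · by_contra hY
      have hsub : v ⊆ ['X', 'Z'] := by
        intro c hc
        rcases hs c hc with h | h | h
        · simp [h]
        · exact absurd (h ▸ hc) hY
        · simp [h]
      have := (hn.subperm hsub).length_le
      simp at this; omega
    · by_contra hZ
      have hsub : v ⊆ ['X', 'Y'] := by
        intro c hc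
        rcases hs c hc with h | h | h
        · simp [h]
        · simp [h]
        · exact absurd (h ▸ hc) hZ
      have := (hn.subperm hsub).length_le
      simp at this; omega
  · rintro ⟨hX, hY, hZ⟩
    have hsub : ['X', 'Y', 'Z'] ⊆ v := by
      intro c hc
      simp only [List.mem_cons, List.not_mem_nil, or_false] at hc
      rcases hc with rfl | rfl | rfl <;> assumption
    have h3 := ((by decide : (['X', 'Y', 'Z'] : List Char).Nodup).subperm hsub).length_le
    have hle : v.length ≤ 3 := by
      have hsub' : v ⊆ ['X', 'Y', 'Z'] := by
        intro c hc; rcases hs c hc with h | h | h <;> simp [h]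
      simpa using (hn.subperm hsub').length_le
    simp at h3; omega

theorem pvMain (names : List String) :
    find_cartesian_vector_names_from_names_py names =
      find_cartesian_vector_names_from_names_py_alt names := by
  obtain ⟨hnd, hb⟩ := pvFold_inv names ([], [], []) PySem.Dict.empty pvInv_init
  unfold find_cartesian_vector_names_from_names_py find_cartesian_vector_names_from_names_py_alt
  set st := names.foldl pvStepA ([], [], []) with hst
  set d := names.foldl pvStepB PySem.Dict.empty with hd
  apply PySem.List.sorted_eq_sorted_of_perm _ _ _ (fun _ _ hab => hab)
  have ndA : (PySem.Set.inter (PySem.Set.inter (PySem.Set.ofList st.1) (PySem.Set.ofList st.2.1))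
      (PySem.Set.ofList st.2.2)).Nodup :=
    PySem.Set.nodup_inter _ _ (PySem.Set.nodup_inter _ _ (PySem.Set.nodup_ofList _))
  have ndB : ((d.items.filter (fun p => PySem.Set.len p.2 == 3)).map (fun p => p.1)).Nodup := by
    have hnd' : (d.items.map (fun p => p.1)).Nodup := by
      simpa only [PySem.Dict.keys] using hnd
    exact hnd'.sublist (List.Sublist.map _ List.filter_sublist)
  rw [List.perm_ext_iff_of_nodup ndA ndB]
  intro b
  obtain ⟨h1, h2, h3, h4, h5⟩ := hb b
  constructor
  · intro hmem
    have hx : b ∈ st.1 ∧ b ∈ st.2.1 ∧ b ∈ st.2.2 := by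
      have := (PySem.Set.mem_inter _ _ b).1 hmem
      have h' := (PySem.Set.mem_inter _ _ b).1 this.1
      exact ⟨(PySem.Set.mem_ofList _ _).1 h'.1, (PySem.Set.mem_ofList _ _).1 h'.2,
        (PySem.Set.mem_ofList _ _).1 this.2⟩
    have hlen : (d.getD b PySem.Set.empty).length = 3 :=
      (pvLen3 _ h1 h2).2 ⟨h3.2 hx.1, h4.2 hx.2.1, h5.2 hx.2.2⟩
    have hne : d.getD b PySem.Set.empty ≠ PySem.Set.empty := by
      intro he; rw [he] at hlen; simp [PySem.Set.empty] at hlen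
    have hcont : d.contains b = true := by
      by_contra hc
      have hcf : d.contains b = false := by revert hc; cases h : d.contains b <;> simp
      exact hne (PySem.Dict.getD_of_not_contains d _ hcf)
    have hsome : (d.get? b).isSome = true := by
      rw [← PySem.Dict.contains_eq_isSome_get?]; exact hcont
    obtain ⟨v, hv⟩ := Option.isSome_iff_exists.1 hsome
    have hitems : (b, v) ∈ d.items := PySem.Dict.mem_items_of_get?_eq_some d hv
    have hgv : d.getD b PySem.Set.empty = v := PySem.Dict.getD_of_mem_items d hitems hnd _
    refine List.mem_map.2 ⟨(b, v), List.mem_filter.2 ⟨hitems, ?_⟩, rfl⟩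
    have hv3 : PySem.Set.len v = 3 := by
      simp only [PySem.Set.len, ← hgv, hlen]; norm_num
    simpa using hv3
  · intro hmem
    obtain ⟨pr, hpf, hk⟩ := List.mem_map.1 hmem
    obtain ⟨hitems, hlen⟩ := List.mem_filter.1 hpf
    have hpr : pr = (b, pr.2) := by cases pr; simp_all
    rw [hpr] at hitems
    have hgv : d.getD b PySem.Set.empty = pr.2 := PySem.Dict.getD_of_mem_items d hitems hnd _
    have hlen3 : (d.getD b PySem.Set.empty).length = 3 := by
      rw [hgv]
      have hv3 : PySem.Set.len pr.2 = 3 := by simpa using hlen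
      simp only [PySem.Set.len] at hv3
      exact_mod_cast hv3
    obtain ⟨hX, hY, hZ⟩ := (pvLen3 _ h1 h2).1 hlen3
    refine (PySem.Set.mem_inter _ _ b).2 ⟨(PySem.Set.mem_inter _ _ b).2
      ⟨(PySem.Set.mem_ofList _ _).2 (h3.1 hX), (PySem.Set.mem_ofList _ _).2 (h4.1 hY)⟩,
      (PySem.Set.mem_ofList _ _).2 (h5.1 hZ)⟩

-- ===== VERDICT (by name: the statement is the Claim_ definition above) =====
theorem find_cartesian_vector_names_from_names_py_spec : Claim_equal_find_cartesian_vector_names_from_names_py := by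
  intro names _ _
  exact pvMain names
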